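-- pv_equiv track=rewrite | github.com/sonic-net/sonic-alpine | deploy/kne/alpine-otg/run_dsl.py | parse_table_for_counters
-- ===== SOURCE A (Python) =====
-- def parse_table_for_counters(txt: str):
--     p1tx=p1rx=p2tx=p2rx=0
--     for line in txt.splitlines():
--         parts = [p.strip() for p in line.split('|')]
--         if len(parts) < 5:
--             continue
--         name, tx, rx = parts[1], parts[2], parts[3]
--         if name == 'p1':
--             p1tx = int(tx) if tx.isdigit() else 0
--             p1rx = int(rx) if rx.isdigit() else 0
--         elif name == 'p2':
--             p2tx = int(tx) if tx.isdigit() else 0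
--             p2rx = int(rx) if rx.isdigit() else 0
--     return p1tx, p1rx, p2tx, p2rx
-- ===== SOURCE B (Python) =====
-- def _find(name, rev_lines):
--     # first matching row in the reversed line list = last matching row of the text
--     for line in rev_lines:
--         parts = [p.strip() for p in line.split('|')]
--         if len(parts) >= 5 and parts[1] == name:
--             return (int(parts[2]) if parts[2].isdigit() else 0,
--                     int(parts[3]) if parts[3].isdigit() else 0)
--     return (0, 0)
--
--
-- def parse_table_for_counters(txt: str):
--     rev = txt.splitlines()[::-1]
--     p1tx, p1rx = _find('p1', rev)
--     p2tx, p2rx = _find('p2', rev)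
--     return p1tx, p1rx, p2tx, p2rx
-- ===== Notes on version B (the rewrite author's own statement) =====
-- stated objective: alternative
-- what changed: B replaces A's single forward fold over four overwriting scalar accumulators with two staged first-match searches over the reversed line list (last-write-wins becomes first-match-on-reverse).
import Mathlib
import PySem

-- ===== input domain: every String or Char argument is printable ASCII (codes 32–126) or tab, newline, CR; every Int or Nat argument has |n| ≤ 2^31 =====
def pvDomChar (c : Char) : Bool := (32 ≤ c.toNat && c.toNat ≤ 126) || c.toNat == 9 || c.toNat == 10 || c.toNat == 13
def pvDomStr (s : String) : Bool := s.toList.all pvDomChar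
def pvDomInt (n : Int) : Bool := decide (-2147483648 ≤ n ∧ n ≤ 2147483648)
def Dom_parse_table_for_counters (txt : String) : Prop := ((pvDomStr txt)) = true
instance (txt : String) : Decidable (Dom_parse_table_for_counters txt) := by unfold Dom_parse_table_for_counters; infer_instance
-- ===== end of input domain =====

-- B drops A's four-accumulator overwrite fold: it reverses the line list and, per port,
-- returns the FIRST matching row of the reversed list (objective: alternative).

-- ===== PORT A =====
-- loop body of A, branching on the row name into the four scalar accumulators
def pvStepA (s : Int × Int × Int × Int) (line : String) : Int × Int × Int × Int :=
  let parts := ((PySem.Str.split? line "|").getD []).map PySem.Str.strip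
  if parts.length < 5 then s
  else
    let name := PySem.List.pyGetD parts 1 ""
    let tx := PySem.List.pyGetD parts 2 ""
    let rx := PySem.List.pyGetD parts 3 ""
    if name = "p1" then
      ((if PySem.Str.strIsdigit tx then (PySem.Int.ofStr? tx).getD 0 else 0),
       (if PySem.Str.strIsdigit rx then (PySem.Int.ofStr? rx).getD 0 else 0),
       s.2.2.1, s.2.2.2)
    else if name = "p2" then
      (s.1, s.2.1,
       (if PySem.Str.strIsdigit tx then (PySem.Int.ofStr? tx).getD 0 else 0),
       (if PySem.Str.strIsdigit rx then (PySem.Int.ofStr? rx).getD 0 else 0))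
    else s

def parse_table_for_counters (txt : String) : Int × Int × Int × Int :=
  (PySem.Str.splitlines txt).foldl pvStepA (0, 0, 0, 0)

-- ===== PORT B =====
-- _find: first row of the reversed line list whose name cell matches, else (0, 0)
def pvFind (name : String) : List String → Int × Int
  | [] => (0, 0)
  | l :: rest =>
    let parts := ((PySem.Str.split? l "|").getD []).map PySem.Str.strip
    if 5 ≤ parts.length ∧ PySem.List.pyGetD parts 1 "" = name then
      ((if PySem.Str.strIsdigit (PySem.List.pyGetD parts 2 "") then (PySem.Int.ofStr? (PySem.List.pyGetD parts 2 "")).getD 0 else 0),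
       (if PySem.Str.strIsdigit (PySem.List.pyGetD parts 3 "") then (PySem.Int.ofStr? (PySem.List.pyGetD parts 3 "")).getD 0 else 0))
    else pvFind name rest

def parse_table_for_counters_alt (txt : String) : Int × Int × Int × Int :=
  let rev := (PySem.Str.splitlines txt).reverse
  let p1 := pvFind "p1" rev
  let p2 := pvFind "p2" rev
  (p1.1, p1.2, p2.1, p2.2)

-- ===== PRECONDITION & SPEC =====
def Spec_parse_table_for_counters (txt : String) (out : Int × Int × Int × Int) : Prop := out = parse_table_for_counters_alt txt
instance (txt : String) (out : Int × Int × Int × Int) : Decidable (Spec_parse_table_for_counters txt out) := by unfold Spec_parse_table_for_counters; infer_instance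

-- ===== CLAIM (what is proved, stated in full; the proofs are below) =====
def Claim_equal_parse_table_for_counters : Prop := ∀ (txt : String), Dom_parse_table_for_counters txt → Spec_parse_table_for_counters txt (parse_table_for_counters txt)

-- ===== LEMMAS AND PROOFS =====

-- one row's contribution, as an Option (proof helper)
def pvHit (name l : String) : Option (Int × Int) :=
  let parts := ((PySem.Str.split? l "|").getD []).map PySem.Str.strip
  if 5 ≤ parts.length ∧ PySem.List.pyGetD parts 1 "" = name then
    some ((if PySem.Str.strIsdigit (PySem.List.pyGetD parts 2 "") then (PySem.Int.ofStr? (PySem.List.pyGetD parts 2 "")).getD 0 else 0),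
          (if PySem.Str.strIsdigit (PySem.List.pyGetD parts 3 "") then (PySem.Int.ofStr? (PySem.List.pyGetD parts 3 "")).getD 0 else 0))
  else none

-- pvFind generalized with an explicit default for the empty-list case
def pvFindD (name : String) (d : Int × Int) : List String → Int × Int
  | [] => d
  | l :: rest =>
    match pvHit name l with
    | some v => v
    | none => pvFindD name d rest

theorem pvFind_eq_findD (name : String) (ls : List String) :
    pvFind name ls = pvFindD name (0, 0) ls := by
  induction ls with
  | nil => rfl
  | cons l rest ih =>
      simp only [pvFind, pvFindD, pvHit]
      split_ifs with h <;> simp [ih]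

theorem pvFindD_append (name : String) (d : Int × Int) (xs : List String) (l : String) :
    pvFindD name d (xs ++ [l]) = pvFindD name (pvFindD name d [l]) xs := by
  induction xs with
  | nil => rfl
  | cons x rest ih =>
      rw [List.cons_append]
      cases h : pvHit name x with
      | some v => simp only [pvFindD, h]
      | none => simpa only [pvFindD, h] using ih

-- one step of A's fold, seen through the two defaulted first-match views
theorem pvStep_views (s : Int × Int × Int × Int) (l : String) :
    ((pvStepA s l).1, (pvStepA s l).2.1) = pvFindD "p1" (s.1, s.2.1) [l] ∧
    ((pvStepA s l).2.2.1, (pvStepA s l).2.2.2) = pvFindD "p2" (s.2.2.1, s.2.2.2) [l] := by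
  simp only [pvStepA, pvFindD, pvHit]
  split_ifs with h1 h2 h3 h4 h5 <;> simp_all <;> omega

-- the invariant: foldl's p1/p2 accumulators are first-match on the reversed prefix
theorem pvFold_eq_find (lines : List String) :
    ∀ s : Int × Int × Int × Int,
      (((lines.foldl pvStepA s).1, (lines.foldl pvStepA s).2.1)
          = pvFindD "p1" (s.1, s.2.1) lines.reverse) ∧
      (((lines.foldl pvStepA s).2.2.1, (lines.foldl pvStepA s).2.2.2)
          = pvFindD "p2" (s.2.2.1, s.2.2.2) lines.reverse) := by
  induction lines with
  | nil => intro s; exact ⟨rfl, rfl⟩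
  | cons l rest ih =>
      intro s
      obtain ⟨st1, st2⟩ := pvStep_views s l
      obtain ⟨ih1, ih2⟩ := ih (pvStepA s l)
      refine ⟨?_, ?_⟩ <;>
        simp only [List.foldl_cons, List.reverse_cons, pvFindD_append, ← st1, ← st2, ih1, ih2]

-- ===== VERDICT (by name: the statement is the Claim_ definition above) =====
theorem parse_table_for_counters_spec : Claim_equal_parse_table_for_counters := by
  intro txt _
  unfold Spec_parse_table_for_counters parse_table_for_counters parse_table_for_counters_alt
  obtain ⟨h1, h2⟩ := pvFold_eq_find (PySem.Str.splitlines txt) (0, 0, 0, 0)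
  simp only [pvFind_eq_findD]
  simp only [← h1, ← h2]
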